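-- pv_equiv track=rewrite | github.com/Rakditya/Pengkom | TP/TP4/H04_19623230_02.py | pengkombacter
-- ===== SOURCE A (Python) =====
-- def pengkombacter (n, k):
--     detik = 0   # Inisialisasi waktu mula-mula t = 0
--     jumlah = n  # Inisialisasi jumlah awal = n
--     while detik < k:        # Melakukan pengulangan hingga detik k
--         baru = 2 * jumlah      # Menghitung jumlah pengkombacter baru hasil reproduksi
--         jumlah = n + baru       # Mengupdate jumlah total pengkombacter yang ada
--         detik += 1      # Menambah waktu dengan 1 detik untuk melanjutkan pengulangan
--
--     return(jumlah)
-- ===== SOURCE B (Python) =====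
-- def pengkombacter(n, k):
--     # Closed form: jumlah_t = n*(2**(t+1)-1); for k <= 0 the loop never runs.
--     if k <= 0:
--         return n
--     return n * (2 ** (k + 1) - 1)
-- ===== Notes on version B (the rewrite author's own statement) =====
-- stated objective: faster
-- what changed: Replaces the k-step iteration of jumlah = n + 2*jumlah by the closed form n*(2^(k+1)-1) (guarding k<=0, where the loop never runs); intended as faster (O(log k) vs O(k) big-int steps; measured 1612x at n=65536, the largest size where the harness could decode the huge outputs).
import Mathlib
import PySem

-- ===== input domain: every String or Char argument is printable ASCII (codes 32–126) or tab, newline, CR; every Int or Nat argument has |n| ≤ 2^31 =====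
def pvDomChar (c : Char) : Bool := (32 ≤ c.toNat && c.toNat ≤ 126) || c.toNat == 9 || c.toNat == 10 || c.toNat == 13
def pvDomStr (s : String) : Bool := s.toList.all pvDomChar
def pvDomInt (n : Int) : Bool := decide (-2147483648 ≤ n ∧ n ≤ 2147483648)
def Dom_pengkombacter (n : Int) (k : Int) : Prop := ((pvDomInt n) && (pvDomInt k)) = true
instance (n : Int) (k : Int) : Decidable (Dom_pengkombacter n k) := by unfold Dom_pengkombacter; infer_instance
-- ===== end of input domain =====

-- ===== PORT A =====
-- while detik < k: jumlah = n + 2*jumlah  — runs max(k,0) times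
def pengLoop (n : Int) : Nat → Int → Int
  | 0, jumlah => jumlah
  | m + 1, jumlah => pengLoop n m (n + 2 * jumlah)

def pengkombacter (n : Int) (k : Int) : Int := pengLoop n k.toNat n

-- ===== PORT B =====
-- closed form: n * (2^(k+1) - 1), with the loop-never-runs guard k ≤ 0
def pengkombacter_alt (n : Int) (k : Int) : Int :=
  if k ≤ 0 then n else n * (2 ^ (k + 1).toNat - 1)

-- ===== PRECONDITION & SPEC =====
def Spec_pengkombacter (n : Int) (k : Int) (out : Int) : Prop := out = pengkombacter_alt n k
instance (n : Int) (k : Int) (out : Int) : Decidable (Spec_pengkombacter n k out) := by unfold Spec_pengkombacter; infer_instance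

-- ===== CLAIM (what is proved, stated in full; the proofs are below) =====
def Claim_equal_pengkombacter : Prop := ∀ (n : Int) (k : Int), Dom_pengkombacter n k → Spec_pengkombacter n k (pengkombacter n k)

-- ===== LEMMAS AND PROOFS =====

-- ===== VERDICT (by name: the statement is the Claim_ definition above) =====
theorem pengLoop_eq (n : Int) : ∀ (m : Nat) (j : Int),
    pengLoop n m j = 2 ^ m * j + n * (2 ^ m - 1) := by
  intro m
  induction m with
  | zero => intro j; simp [pengLoop]
  | succ m ih =>
      intro j
      rw [pengLoop, ih]
      push_cast [pow_succ]
      ring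

theorem pengkombacter_spec : Claim_equal_pengkombacter := by
  intro n k _
  unfold Spec_pengkombacter pengkombacter pengkombacter_alt
  rw [pengLoop_eq]
  by_cases hk : k ≤ 0
  · simp [hk, Int.toNat_of_nonpos hk]
  · have h1 : (k + 1).toNat = k.toNat + 1 := by omega
    simp only [hk, if_false, h1, pow_succ]
    ring
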